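-- pv_equiv track=rewrite | github.com/becoding96/BOJ | ssafy/solve_code/220916/1238_Contact/main.py | bfs
-- ===== SOURCE A (Python) =====
-- from collections import deque
--
-- def bfs(v, lst):
--     visited = [0] * 101
--     visited[v] = 1
--     q = deque([v])
--     while True:
--         length = len(q)
--         result = 0
--         for _ in range(length):
--             cur = q.popleft()
--             result = cur if result < cur else result
--             for nv in lst[cur]:  # 동시에 연락을 취한다
--                 if visited[nv] == 0:
--                     q.append(nv)
--                     visited[nv] = 1
--         if not q:
--             return result
-- ===== SOURCE B (Python) =====
-- def bfs(v, lst):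
--     dist = [None] * 101
--     dist[v] = 0
--     q = [v]
--     head = 0
--     while head < len(q):
--         cur = q[head]
--         head += 1
--         for nv in lst[cur]:
--             if dist[nv] is None:
--                 dist[nv] = dist[cur] + 1
--                 q.append(nv)
--     maxd = max(dist[x] for x in q)
--     res = 0
--     for x in q:
--         if dist[x] == maxd and res < x:
--             res = x
--     return res
-- ===== Notes on version B (the rewrite author's own statement) =====
-- stated objective: simpler
-- what changed: Replaces A's layer-by-layer deque loop with interleaved per-layer max tracking by a plain single-queue distance BFS (dist array, no layer boundaries) followed by two separate passes computing the maximum distance and then the maximum vertex at that distance.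
import Mathlib
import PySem

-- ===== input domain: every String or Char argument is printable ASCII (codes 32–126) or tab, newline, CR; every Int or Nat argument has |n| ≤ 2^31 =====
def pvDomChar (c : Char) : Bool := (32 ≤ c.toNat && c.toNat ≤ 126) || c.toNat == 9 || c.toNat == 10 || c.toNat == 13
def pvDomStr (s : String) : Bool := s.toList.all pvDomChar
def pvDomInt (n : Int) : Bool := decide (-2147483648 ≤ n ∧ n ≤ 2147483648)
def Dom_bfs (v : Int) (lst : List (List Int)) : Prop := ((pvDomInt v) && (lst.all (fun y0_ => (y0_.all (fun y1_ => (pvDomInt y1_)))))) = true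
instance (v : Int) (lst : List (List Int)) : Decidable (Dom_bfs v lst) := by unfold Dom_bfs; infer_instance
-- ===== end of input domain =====

-- B replaces A's layer-by-layer deque loop (per-layer max tracking) by a plain distance-BFS
-- plus a separate max-vertex-at-max-distance extraction pass; objective: simpler.

-- ===== PORT A =====
-- termination helpers for the while-loops (cited in decreasing_by)
theorem pvIdx_lt (n : Nat) (i : Int) (k : Nat) (h : PySem.List.pyIdx? n i = some k) : k < n := by
  unfold PySem.List.pyIdx? at h
  split_ifs at h <;> simp_all <;> omega

theorem pvCount_flip {α : Type} [BEq α] [LawfulBEq α] (xs : List α) (i : Int) (a b : α)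
    (h : PySem.List.pyGet? xs i = some a) (hne : ¬ b = a) :
    (PySem.List.pySetD xs i b).count a + 1 = xs.count a := by
  unfold PySem.List.pyGet? at h
  rcases hk : PySem.List.pyIdx? xs.length i with _ | k
  · rw [hk] at h; simp at h
  · rw [hk] at h; simp at h
    have hlt : k < xs.length := pvIdx_lt _ _ _ hk
    have hget : xs[k] = a := by
      have := h; rw [List.getElem?_eq_getElem hlt] at this; simpa using this
    have hmem : a ∈ xs := by rw [← hget]; exact List.getElem_mem hlt
    have hpos : 1 ≤ xs.count a := List.one_le_count_iff.mpr hmem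
    unfold PySem.List.pySetD PySem.List.pySet?
    rw [hk]
    simp only [Option.map_some, Option.getD_some]
    rw [List.count_set hlt]
    simp [hget, hne]
    omega

-- inner loop of A: 'for nv in lst[cur]: if visited[nv] == 0: q.append(nv); visited[nv] = 1'
-- (appends accumulate in nq; visited[nv] via pyGet?/pySetD — Python-exact, incl. negative wrap;
-- an out-of-range nv, where Python raises, reads none ≠ some 0 and is skipped)
def bfsVisit (nbrs : List Int) (visited : List Int) (nq : List Int) : List Int × List Int :=
  match nbrs with
  | [] => (visited, nq)
  | nv :: t =>
    if PySem.List.pyGet? visited nv = some 0 then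
      bfsVisit t (PySem.List.pySetD visited nv 1) (nq ++ [nv])
    else bfsVisit t visited nq

theorem bfsVisit_count (nbrs : List Int) (visited nq : List Int) :
    (bfsVisit nbrs visited nq).1.count 0 + (bfsVisit nbrs visited nq).2.length
      = visited.count 0 + nq.length := by
  induction nbrs generalizing visited nq with
  | nil => simp [bfsVisit]
  | cons nv t ih =>
    rw [bfsVisit]
    split
    · rename_i hg
      rw [ih]
      have := pvCount_flip visited nv 0 1 hg (by simp)
      simp only [List.length_append, List.length_cons, List.length_nil]
      omega
    · exact ih visited nq

-- one pass 'for _ in range(length)' over the current deque contents (the layer)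
def bfsLayer (lst : List (List Int)) (layer : List Int) (result : Int) (visited nq : List Int) :
    Int × List Int × List Int :=
  match layer with
  | [] => (result, visited, nq)
  | cur :: t =>
    let result := if result < cur then cur else result
    let p := bfsVisit ((PySem.List.pyGet? lst cur).getD []) visited nq
    bfsLayer lst t result p.1 p.2

theorem bfsLayer_count (lst : List (List Int)) (layer : List Int) (r : Int) (visited nq : List Int) :
    (bfsLayer lst layer r visited nq).2.1.count 0 + (bfsLayer lst layer r visited nq).2.2.length
      = visited.count 0 + nq.length := by
  induction layer generalizing r visited nq with
  | nil => simp [bfsLayer]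
  | cons cur t ih =>
    rw [bfsLayer]
    rw [ih]
    exact bfsVisit_count _ _ _

-- the 'while True' loop of A
def bfsLoopA (lst : List (List Int)) (visited q : List Int) : Int :=
  let t := bfsLayer lst q 0 visited []
  if t.2.2 = [] then t.1 else bfsLoopA lst t.2.1 t.2.2
termination_by visited.count 0
decreasing_by
  rename_i h
  have hc := bfsLayer_count lst q 0 visited []
  have h2 : (bfsLayer lst q 0 visited []).2.2.length ≠ 0 := by
    simpa [List.length_eq_zero_iff] using h
  simp only [List.length_nil] at hc
  omega

def bfs (v : Int) (lst : List (List Int)) : Int :=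
  bfsLoopA lst (PySem.List.pySetD (List.replicate 101 (0 : Int)) v 1) [v]

-- ===== PORT B =====
-- inner loop of B: 'for nv in lst[cur]: if dist[nv] is None: dist[nv] = d + 1; q.append(nv)'
def bfsRelax (nbrs : List Int) (d : Int) (dist : List (Option Int)) (app : List Int) :
    List (Option Int) × List Int :=
  match nbrs with
  | [] => (dist, app)
  | nv :: t =>
    if PySem.List.pyGet? dist nv = some none then
      bfsRelax t d (PySem.List.pySetD dist nv (some (d + 1))) (app ++ [nv])
    else bfsRelax t d dist app

theorem bfsRelax_count (nbrs : List Int) (d : Int) (dist : List (Option Int)) (app : List Int) :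
    (bfsRelax nbrs d dist app).1.count none + (bfsRelax nbrs d dist app).2.length
      = dist.count none + app.length := by
  induction nbrs generalizing dist app with
  | nil => simp [bfsRelax]
  | cons nv t ih =>
    rw [bfsRelax]
    split
    · rename_i hg
      rw [ih]
      have := pvCount_flip dist nv none (some (d + 1)) hg (by simp)
      simp only [List.length_append, List.length_cons, List.length_nil]
      omega
    · exact ih dist app

-- the 'while head < len(q)' loop of B: done = q[:head] (already popped), pending = q[head:]
def bfsLoopB (lst : List (List Int)) (dist : List (Option Int)) (done pending : List Int) :
    List (Option Int) × List Int :=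
  match pending with
  | [] => (dist, done)
  | cur :: rest =>
    let d := ((PySem.List.pyGet? dist cur).getD none).getD 0   -- dist[cur] (an int for every popped cur)
    let t := bfsRelax ((PySem.List.pyGet? lst cur).getD []) d dist []
    bfsLoopB lst t.1 (done ++ [cur]) (rest ++ t.2)
termination_by dist.count none + pending.length
decreasing_by
  have hc := bfsRelax_count ((PySem.List.pyGet? lst cur).getD [])
    (((PySem.List.pyGet? dist cur).getD none).getD 0) dist []
  simp only [List.length_nil, List.length_append, List.length_cons] at hc ⊢
  omega

-- B's two trailing passes: maxd = max(dist[x] for x in q), then the res-scan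
-- (q is never empty — it contains v — so the [] branch of maxd is Python's unreachable ValueError)
def bfsExtract (dist : List (Option Int)) (q : List Int) : Int :=
  let dvals := q.map (fun x => ((PySem.List.pyGet? dist x).getD none).getD 0)
  let maxd : Int :=
    match dvals with
    | [] => 0
    | x :: xs => xs.foldl (fun r c => if r < c then c else r) x
  q.foldl (fun res x =>
    if PySem.List.pyGet? dist x = some (some maxd) ∧ res < x then x else res) 0

def bfs_alt (v : Int) (lst : List (List Int)) : Int :=
  bfsExtract
    (bfsLoopB lst (PySem.List.pySetD (List.replicate 101 (none : Option Int)) v (some 0)) [] [v]).1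
    (bfsLoopB lst (PySem.List.pySetD (List.replicate 101 (none : Option Int)) v (some 0)) [] [v]).2

-- ===== PRECONDITION & SPEC =====
-- A raises IndexError exactly when its traversal reaches a vertex label outside range(101) or
-- outside range(len(lst)) (negative labels wrap, as in Python).  Pre_ states that domain
-- declaratively: the start vertex is a valid index and every label in the graph closure of {v}
-- (valid labels in [-101,101) adjacent through lst) is valid.  The closure is a plain graph
-- fixpoint over the input (each monotone step adds a label drawn from the entries of lst, so
-- lst.flatten.length steps saturate it); it does not touch either port.
def pvOkV (x : Int) : Bool := decide (-101 ≤ x ∧ x < 101)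
def pvOk2 (lst : List (List Int)) (x : Int) : Bool :=
  pvOkV x && decide (-(lst.length : Int) ≤ x ∧ x < (lst.length : Int))
def pvRow (lst : List (List Int)) (x : Int) : List Int := (PySem.List.pyGet? lst x).getD []
def pvStep (lst : List (List Int)) (S : List Int) : List Int :=
  PySem.List.dedup (S ++ S.flatMap (fun y => if pvOk2 lst y then (pvRow lst y).filter pvOkV else []))
def pvReach (lst : List (List Int)) (v : Int) : Nat → List Int
  | 0 => [v]
  | n + 1 => pvStep lst (pvReach lst v n)
def Pre_bfs (v : Int) (lst : List (List Int)) : Prop :=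
  pvOk2 lst v = true ∧
    ∀ x ∈ pvReach lst v lst.flatten.length, pvOk2 lst x = true ∧ ∀ m ∈ pvRow lst x, pvOkV m = true
instance (v : Int) (lst : List (List Int)) : Decidable (Pre_bfs v lst) := by
  unfold Pre_bfs; infer_instance

def pvWitness_bfs : Int × List (List Int) := (0, [[1], [0]])

def Spec_bfs (v : Int) (lst : List (List Int)) (out : Int) : Prop := out = bfs_alt v lst
instance (v : Int) (lst : List (List Int)) (out : Int) : Decidable (Spec_bfs v lst out) := by
  unfold Spec_bfs; infer_instance

-- ===== CLAIM (what is proved, stated in full; the proofs are below) =====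
def Claim_equal_bfs : Prop := ∀ (v : Int) (lst : List (List Int)),
  Dom_bfs v lst → Pre_bfs v lst → Spec_bfs v lst (bfs v lst)

-- ===== LEMMAS AND PROOFS =====

-- A's visited array and B's dist array (both always of length 101) mark the same cells
def RelAB (visited : List Int) (dist : List (Option Int)) : Prop :=
  visited.length = 101 ∧ dist.length = 101 ∧
    ∀ j : Nat, j < 101 → (visited.getD j 1 = 0 ↔ dist.getD j none = none)

-- whole-layer processing on B's side (one procB step = B's queue loop popping one layer)
def procB (lst : List (List Int)) (layer : List Int) (dist : List (Option Int)) (app : List Int) :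
    List (Option Int) × List Int :=
  match layer with
  | [] => (dist, app)
  | cur :: t =>
    let d := ((PySem.List.pyGet? dist cur).getD none).getD 0
    let r := bfsRelax ((PySem.List.pyGet? lst cur).getD []) d dist app
    procB lst t r.1 r.2

-- resolving a Python index to its cell
theorem pyGet?_cell {α : Type} (xs : List α) (nv : Int) (a : α)
    (h : PySem.List.pyGet? xs nv = some a) :
    ∃ c : Nat, PySem.List.pyIdx? xs.length nv = some c ∧ ∃ hc : c < xs.length, xs[c] = a := by
  unfold PySem.List.pyGet? at h
  rcases hk : PySem.List.pyIdx? xs.length nv with _ | c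
  · rw [hk] at h; simp at h
  · rw [hk] at h
    have hc := pvIdx_lt _ _ _ hk
    refine ⟨c, rfl, hc, ?_⟩
    rw [Option.bind_some, List.getElem?_eq_getElem hc] at h
    simpa using h

theorem pyGet?_of_cell {α : Type} (xs : List α) (nv : Int) (c : Nat)
    (hk : PySem.List.pyIdx? xs.length nv = some c) :
    PySem.List.pyGet? xs nv = xs[c]? := by
  unfold PySem.List.pyGet?
  rw [hk, Option.bind_some]

theorem pyGet?_eq_some_getD {α : Type} (xs : List α) (nv : Int) (c : Nat) (d : α)
    (hk : PySem.List.pyIdx? xs.length nv = some c) :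
    PySem.List.pyGet? xs nv = some (xs.getD c d) := by
  have hc := pvIdx_lt _ _ _ hk
  rw [pyGet?_of_cell xs nv c hk, List.getElem?_eq_getElem hc, List.getD_eq_getElem _ _ hc]

theorem pySetD_cell {α : Type} (xs : List α) (nv : Int) (c : Nat) (b : α)
    (hk : PySem.List.pyIdx? xs.length nv = some c) :
    PySem.List.pySetD xs nv b = xs.set c b := by
  unfold PySem.List.pySetD PySem.List.pySet?
  rw [hk]
  rfl

theorem getD_set' {α : Type} (xs : List α) (c : Nat) (b d : α) (j : Nat) (hj : j < xs.length) :
    (xs.set c b).getD j d = if c = j then b else xs.getD j d := by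
  have hj' : j < (xs.set c b).length := by simpa using hj
  rw [List.getD_eq_getElem _ _ hj', List.getD_eq_getElem _ _ hj]
  by_cases he : c = j
  · subst he; simp [List.getElem_set_self]
  · simp [he]

-- the two guards agree cell for cell
theorem guard_iff (visited : List Int) (dist : List (Option Int)) (hRel : RelAB visited dist)
    (x : Int) :
    (PySem.List.pyGet? visited x = some 0 ↔ PySem.List.pyGet? dist x = some none) := by
  obtain ⟨hv, hd, hp⟩ := hRel
  unfold PySem.List.pyGet?
  rw [hv, hd]
  rcases hk : PySem.List.pyIdx? 101 x with _ | c
  · simp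
  · have hc := pvIdx_lt _ _ _ hk
    have := hp c hc
    rw [List.getD_eq_getElem _ _ (by omega), List.getD_eq_getElem _ _ (by omega)] at this
    rw [Option.bind_some, Option.bind_some,
        List.getElem?_eq_getElem (show c < visited.length by omega),
        List.getElem?_eq_getElem (show c < dist.length by omega)]
    constructor <;> intro h <;> simp_all

theorem RelAB_set (visited : List Int) (dist : List (Option Int)) (hRel : RelAB visited dist)
    (c : Nat) (o : Int) :
    RelAB (visited.set c 1) (dist.set c (some o)) := by
  obtain ⟨hv, hd, hp⟩ := hRel
  refine ⟨by simpa using hv, by simpa using hd, ?_⟩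
  intro j hj
  rw [getD_set' visited c 1 1 j (by omega), getD_set' dist c (some o) none j (by omega)]
  by_cases he : c = j
  · simp [he]
  · simpa [he] using hp j hj

theorem bfsRelax_app (nbrs : List Int) (d : Int) (dist : List (Option Int)) (app : List Int) :
    bfsRelax nbrs d dist app
      = ((bfsRelax nbrs d dist []).1, app ++ (bfsRelax nbrs d dist []).2) := by
  induction nbrs generalizing dist app with
  | nil => simp [bfsRelax]
  | cons nv t ih =>
    simp only [bfsRelax]
    split
    · rw [ih _ (app ++ [nv]), ih _ ([] ++ [nv])]
      simp
    · exact ih _ _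

theorem bfsVisit_app (nbrs : List Int) (visited nq : List Int) :
    bfsVisit nbrs visited nq
      = ((bfsVisit nbrs visited []).1, nq ++ (bfsVisit nbrs visited []).2) := by
  induction nbrs generalizing visited nq with
  | nil => simp [bfsVisit]
  | cons nv t ih =>
    simp only [bfsVisit]
    split
    · rw [ih _ (nq ++ [nv]), ih _ ([] ++ [nv])]
      simp
    · exact ih _ _

theorem bfsLayer_app (lst : List (List Int)) (layer : List Int) (r : Int) (visited nq : List Int) :
    bfsLayer lst layer r visited nq
      = ((bfsLayer lst layer r visited []).1, (bfsLayer lst layer r visited []).2.1,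
          nq ++ (bfsLayer lst layer r visited []).2.2) := by
  induction layer generalizing r visited nq with
  | nil => simp [bfsLayer]
  | cons cur t ih =>
    simp only [bfsLayer]
    rw [bfsVisit_app _ _ nq]
    dsimp only
    rw [ih (if r < cur then cur else r) _ (nq ++ (bfsVisit ((PySem.List.pyGet? lst cur).getD []) visited []).2),
        ih (if r < cur then cur else r) _ ((bfsVisit ((PySem.List.pyGet? lst cur).getD []) visited []).2)]
    simp

theorem procB_app (lst : List (List Int)) (layer : List Int) (dist : List (Option Int)) (app : List Int) :
    procB lst layer dist app
      = ((procB lst layer dist []).1, app ++ (procB lst layer dist []).2) := by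
  induction layer generalizing dist app with
  | nil => simp [procB]
  | cons cur t ih =>
    simp only [procB]
    rw [bfsRelax_app _ _ _ app]
    dsimp only
    rw [ih _ (app ++ (bfsRelax ((PySem.List.pyGet? lst cur).getD [])
          (((PySem.List.pyGet? dist cur).getD none).getD 0) dist []).2),
        ih _ ((bfsRelax ((PySem.List.pyGet? lst cur).getD [])
          (((PySem.List.pyGet? dist cur).getD none).getD 0) dist []).2)]
    simp

-- B's queue loop processes one whole layer exactly like procB, appends going behind acc
theorem bfsLoopB_append (lst : List (List Int)) (xs : List Int) :
    ∀ (acc : List Int) (dist : List (Option Int)) (done : List Int),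
    bfsLoopB lst dist done (xs ++ acc)
      = bfsLoopB lst (procB lst xs dist []).1 (done ++ xs) (acc ++ (procB lst xs dist []).2) := by
  induction xs with
  | nil => intro acc dist done; simp [procB]
  | cons cur t ih =>
    intro acc dist done
    rw [List.cons_append, bfsLoopB]
    have hassoc : (t ++ acc) ++ (bfsRelax ((PySem.List.pyGet? lst cur).getD [])
        (((PySem.List.pyGet? dist cur).getD none).getD 0) dist []).2
        = t ++ (acc ++ (bfsRelax ((PySem.List.pyGet? lst cur).getD [])
        (((PySem.List.pyGet? dist cur).getD none).getD 0) dist []).2) := by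
      simp
    rw [hassoc, ih]
    simp only [procB]
    rw [procB_app lst t _ ((bfsRelax ((PySem.List.pyGet? lst cur).getD [])
        (((PySem.List.pyGet? dist cur).getD none).getD 0) dist []).2)]
    simp

-- lockstep: A's inner neighbour loop and B's append the same vertices, preserve RelAB,
-- and B's updates are exactly 'some (d+1)' on the cells of the appended vertices
theorem visit_relax_sim (nbrs : List Int) (visited : List Int) (dist : List (Option Int)) (d : Int)
    (hRel : RelAB visited dist) :
    (bfsVisit nbrs visited []).2 = (bfsRelax nbrs d dist []).2 ∧
    RelAB (bfsVisit nbrs visited []).1 (bfsRelax nbrs d dist []).1 ∧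
    (∀ j : Nat, j < 101 →
      (bfsRelax nbrs d dist []).1.getD j none
        = if (∃ x ∈ (bfsRelax nbrs d dist []).2, PySem.List.pyIdx? 101 x = some j)
          then some (d + 1) else dist.getD j none) ∧
    (∀ x ∈ (bfsRelax nbrs d dist []).2, x ∈ nbrs ∧ PySem.List.pyGet? dist x = some none) := by
  induction nbrs generalizing visited dist with
  | nil =>
    refine ⟨rfl, hRel, ?_, by simp [bfsRelax]⟩
    intro j hj
    simp [bfsRelax]
  | cons nv t ih =>
    rw [bfsVisit, bfsRelax]
    by_cases hg : PySem.List.pyGet? dist nv = some none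
    · have hgv : PySem.List.pyGet? visited nv = some 0 :=
        (guard_iff visited dist hRel nv).mpr hg
      rw [if_pos hgv, if_pos hg]
      obtain ⟨c, hkc, hclt, hcval⟩ := pyGet?_cell dist nv none hg
      rw [hRel.2.1] at hkc
      have hsetv : PySem.List.pySetD visited nv 1 = visited.set c 1 :=
        pySetD_cell visited nv c 1 (by rw [hRel.1]; exact hkc)
      have hsetd : PySem.List.pySetD dist nv (some (d + 1)) = dist.set c (some (d + 1)) :=
        pySetD_cell dist nv c _ (by rw [hRel.2.1]; exact hkc)
      rw [bfsVisit_app _ _ ([] ++ [nv]), bfsRelax_app _ _ _ ([] ++ [nv]), hsetv, hsetd]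
      have hRel1 : RelAB (visited.set c 1) (dist.set c (some (d + 1))) :=
        RelAB_set _ _ hRel c _
      obtain ⟨ihQ, ihRel, ihChar, ihProv⟩ := ih (visited.set c 1) (dist.set c (some (d + 1))) hRel1
      have hd1len : (dist.set c (some (d + 1))).length = 101 := by
        rw [List.length_set, hRel.2.1]
      refine ⟨by simp [ihQ], by simpa using ihRel, ?_, ?_⟩
      · intro j hj
        dsimp only
        have hjd : j < dist.length := by rw [hRel.2.1]; omega
        rw [ihChar j hj, getD_set' dist c _ none j hjd]
        by_cases hjQ : ∃ x ∈ (bfsRelax t d (dist.set c (some (d + 1))) []).2,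
            PySem.List.pyIdx? 101 x = some j
        · rw [if_pos hjQ]
          rw [if_pos ?_]
          obtain ⟨x, hx1, hx2⟩ := hjQ
          exact ⟨x, by simp [hx1], hx2⟩
        · rw [if_neg hjQ]
          by_cases hjc : c = j
          · rw [if_pos hjc, if_pos ?_]
            exact ⟨nv, by simp, by rw [← hjc]; exact hkc⟩
          · rw [if_neg hjc, if_neg ?_]
            rintro ⟨x, hx1, hx2⟩
            rcases List.mem_append.mp hx1 with hx | hx
            · have : x = nv := by simpa using hx
              subst this
              rw [hkc] at hx2
              exact hjc (by simpa using hx2)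
            · exact hjQ ⟨x, hx, hx2⟩
      · intro x hx
        dsimp only at hx
        rcases List.mem_append.mp hx with hx1 | hx2
        · have : x = nv := by simpa using hx1
          subst this
          exact ⟨List.mem_cons_self, hg⟩
        · obtain ⟨hxt, hxd⟩ := ihProv x hx2
          refine ⟨List.mem_cons_of_mem _ hxt, ?_⟩
          obtain ⟨cx, hkx, hcxlt, hcxval⟩ := pyGet?_cell _ x none hxd
          rw [hd1len] at hkx
          have hget : PySem.List.pyGet? dist x = dist[cx]? :=
            pyGet?_of_cell dist x cx (by rw [hRel.2.1]; exact hkx)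
          have hcxd : cx < dist.length := by rw [hRel.2.1]; rw [hd1len] at hcxlt; omega
          by_cases hcc : cx = c
          · exfalso
            subst hcc
            rw [List.getElem_set_self (by omega)] at hcxval
            cases hcxval
          · rw [List.getElem_set_ne (by omega : c ≠ cx)] at hcxval
            rw [hget, List.getElem?_eq_getElem hcxd, hcxval]
    · have hgv : ¬ PySem.List.pyGet? visited nv = some 0 := by
        intro hc
        exact hg ((guard_iff visited dist hRel nv).mp hc)
      rw [if_neg hgv, if_neg hg]
      obtain ⟨q1, q2, q3, q4⟩ := ih visited dist hRel
      exact ⟨q1, q2, q3, fun x hx => ⟨List.mem_cons_of_mem _ (q4 x hx).1, (q4 x hx).2⟩⟩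

-- lockstep over one whole layer
theorem layer_sim (lst : List (List Int)) (layer : List Int) (r : Int)
    (visited : List Int) (dist : List (Option Int)) (k : Int)
    (hRel : RelAB visited dist)
    (hk : ∀ x ∈ layer, PySem.List.pyGet? dist x = some (some k)) :
    (bfsLayer lst layer r visited []).2.2 = (procB lst layer dist []).2 ∧
    RelAB (bfsLayer lst layer r visited []).2.1 (procB lst layer dist []).1 ∧
    (bfsLayer lst layer r visited []).1
      = layer.foldl (fun r c => if r < c then c else r) r ∧
    (∀ j : Nat, j < 101 →
      (procB lst layer dist []).1.getD j none
        = if (∃ x ∈ (procB lst layer dist []).2, PySem.List.pyIdx? 101 x = some j)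
          then some (k + 1) else dist.getD j none) ∧
    (∀ x ∈ (procB lst layer dist []).2, PySem.List.pyGet? dist x = some none) := by
  induction layer generalizing r visited dist with
  | nil =>
    refine ⟨rfl, hRel, by simp [bfsLayer], ?_, by simp [procB]⟩
    intro j hj
    simp [procB]
  | cons cur t ih =>
    have hkc := hk cur List.mem_cons_self
    rw [bfsLayer, procB]
    simp only [hkc, Option.getD_some]
    obtain ⟨vQ, vRel, vChar, vProv⟩ :=
      visit_relax_sim ((PySem.List.pyGet? lst cur).getD []) visited dist k hRel
    have unchanged : ∀ (x : Int) (m : Int), PySem.List.pyGet? dist x = some (some m) →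
        PySem.List.pyGet? (bfsRelax ((PySem.List.pyGet? lst cur).getD []) k dist []).1 x
          = some (some m) := by
      intro x m hx
      obtain ⟨cx, hkx, hcxlt, hcxval⟩ := pyGet?_cell dist x (some m) hx
      rw [hRel.2.1] at hkx
      rw [pyGet?_eq_some_getD _ x cx none (by rw [vRel.2.1]; exact hkx)]
      rw [vChar cx (pvIdx_lt _ _ _ hkx)]
      by_cases hxQ : ∃ y ∈ (bfsRelax ((PySem.List.pyGet? lst cur).getD []) k dist []).2,
          PySem.List.pyIdx? 101 y = some cx
      · exfalso
        obtain ⟨y, hy1, hy2⟩ := hxQ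
        have hyd := vProv y hy1
        obtain ⟨cy, hky, hcylt, hcyval⟩ := pyGet?_cell dist y none hyd.2
        rw [hRel.2.1] at hky
        rw [hky] at hy2
        have : cy = cx := by simpa using hy2
        subst this
        rw [hcyval] at hcxval
        cases hcxval
      · rw [if_neg hxQ, List.getD_eq_getElem _ _ (by rw [hRel.2.1] at hcxlt ⊢; omega), hcxval]
    have hk' : ∀ x ∈ t,
        PySem.List.pyGet? (bfsRelax ((PySem.List.pyGet? lst cur).getD []) k dist []).1 x
          = some (some k) :=
      fun x hx => unchanged x k (hk x (List.mem_cons_of_mem _ hx))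
    obtain ⟨iQ, iRel, iRes, iChar, iProv⟩ :=
      ih (if r < cur then cur else r)
        (bfsVisit ((PySem.List.pyGet? lst cur).getD []) visited []).1
        (bfsRelax ((PySem.List.pyGet? lst cur).getD []) k dist []).1
        vRel hk'
    rw [bfsLayer_app _ _ _ _ ((bfsVisit ((PySem.List.pyGet? lst cur).getD []) visited []).2),
        procB_app _ _ _ ((bfsRelax ((PySem.List.pyGet? lst cur).getD []) k dist []).2)]
    refine ⟨by simp [vQ, iQ], by simpa using iRel, by simpa using iRes, ?_, ?_⟩
    · intro j hj
      dsimp only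
      rw [iChar j hj, vChar j hj]
      by_cases hjQ2 : ∃ x ∈ (procB lst t (bfsRelax ((PySem.List.pyGet? lst cur).getD []) k dist []).1 []).2,
          PySem.List.pyIdx? 101 x = some j
      · rw [if_pos hjQ2, if_pos ?_]
        obtain ⟨x, hx1, hx2⟩ := hjQ2
        exact ⟨x, List.mem_append.mpr (Or.inr hx1), hx2⟩
      · rw [if_neg hjQ2]
        by_cases hjQ1 : ∃ x ∈ (bfsRelax ((PySem.List.pyGet? lst cur).getD []) k dist []).2,
            PySem.List.pyIdx? 101 x = some j
        · rw [if_pos hjQ1, if_pos ?_]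
          obtain ⟨x, hx1, hx2⟩ := hjQ1
          exact ⟨x, List.mem_append.mpr (Or.inl hx1), hx2⟩
        · rw [if_neg hjQ1, if_neg ?_]
          rintro ⟨x, hx1, hx2⟩
          rcases List.mem_append.mp hx1 with hx | hx
          · exact hjQ1 ⟨x, hx, hx2⟩
          · exact hjQ2 ⟨x, hx, hx2⟩
    · intro x hx
      dsimp only at hx
      rcases List.mem_append.mp hx with hx1 | hx2
      · exact (vProv x hx1).2
      · have hxd := iProv x hx2
        obtain ⟨cx, hkx, hcxlt, hcxval⟩ := pyGet?_cell _ x none hxd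
        rw [vRel.2.1] at hkx
        rw [pyGet?_eq_some_getD dist x cx none (by rw [hRel.2.1]; exact hkx)]
        have hchar := vChar cx (pvIdx_lt _ _ _ hkx)
        by_cases hcQ : ∃ y ∈ (bfsRelax ((PySem.List.pyGet? lst cur).getD []) k dist []).2,
            PySem.List.pyIdx? 101 y = some cx
        · exfalso
          rw [if_pos hcQ] at hchar
          rw [List.getD_eq_getElem _ _ hcxlt, hcxval] at hchar
          cases hchar
        · rw [if_neg hcQ] at hchar
          rw [← hchar, List.getD_eq_getElem _ _ hcxlt, hcxval]

theorem pyfold_eq_max (xs : List Int) (x : Int) :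
    xs.foldl (fun r c => if r < c then c else r) x = xs.foldl max x := by
  induction xs generalizing x with
  | nil => rfl
  | cons a t ih =>
    rw [List.foldl_cons, List.foldl_cons, ih]
    congr 1
    rw [max_def]
    split_ifs <;> omega

theorem foldmax_mem (x : Int) (xs : List Int) : xs.foldl max x ∈ x :: xs :=
  List.max?_mem rfl

-- extraction: after the loop q = done ++ layer, the cells of done hold values < k and those of
-- the final (nonempty) layer hold exactly k, so B's two passes return A's per-layer running max
theorem extract_eq (dist : List (Option Int)) (done layer : List Int) (k : Int)
    (hdone : ∀ x ∈ done, ∃ m, PySem.List.pyGet? dist x = some (some m) ∧ m < k)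
    (hk : ∀ x ∈ layer, PySem.List.pyGet? dist x = some (some k))
    (hne : layer ≠ []) :
    bfsExtract dist (done ++ layer)
      = layer.foldl (fun r c => if r < c then c else r) 0 := by
  have hfd : ∀ x ∈ done, ((PySem.List.pyGet? dist x).getD none).getD 0 < k := by
    intro x hx
    obtain ⟨m, hm, hmk⟩ := hdone x hx
    rw [hm]
    simpa using hmk
  have hfl : ∀ x ∈ layer, ((PySem.List.pyGet? dist x).getD none).getD 0 = k := by
    intro x hx
    rw [hk x hx]
    rfl
  obtain ⟨x0, hx0⟩ : ∃ x, x ∈ layer := List.exists_mem_of_ne_nil layer hne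
  unfold bfsExtract
  rcases hdv : (done ++ layer).map (fun x => ((PySem.List.pyGet? dist x).getD none).getD 0)
    with _ | ⟨a, rest⟩
  · exfalso
    have : ((PySem.List.pyGet? dist x0).getD none).getD 0
        ∈ (done ++ layer).map (fun x => ((PySem.List.pyGet? dist x).getD none).getD 0) :=
      List.mem_map_of_mem (List.mem_append.mpr (Or.inr hx0))
    rw [hdv] at this
    cases this
  · dsimp only
    have hmaxd : rest.foldl (fun r c => if r < c then c else r) a = k := by
      rw [pyfold_eq_max]
      have hm1 : rest.foldl max a ∈ a :: rest := foldmax_mem _ _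
      have hub : ∀ m ∈ a :: rest, m ≤ k := by
        intro m hm
        rw [← hdv] at hm
        obtain ⟨x, hxm, hxv⟩ := List.mem_map.mp hm
        rcases List.mem_append.mp hxm with hx | hx
        · have := hfd x hx; omega
        · have := hfl x hx; omega
      have h1 : rest.foldl max a ≤ k := hub _ hm1
      have hkm : k ∈ a :: rest := by
        rw [← hdv]
        have := List.mem_map_of_mem (f := fun x => ((PySem.List.pyGet? dist x).getD none).getD 0)
          (show x0 ∈ done ++ layer from List.mem_append.mpr (Or.inr hx0))
        simpa only [hfl x0 hx0] using this
      have h2 : k ≤ rest.foldl max a := by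
        rcases List.mem_cons.mp hkm with h | h
        · rw [h] at *; exact (PySem.List.le_foldl_max rest a).1
        · exact (PySem.List.le_foldl_max rest a).2 k h
      omega
    have hred : (match a :: rest with
        | [] => (0 : Int)
        | x :: xs => xs.foldl (fun r c => if r < c then c else r) x) = k := hmaxd
    simp only [hred]
    rw [List.foldl_append]
    have hdone0 : done.foldl (fun res x =>
        if PySem.List.pyGet? dist x = some (some k) ∧ res < x then x else res) 0 = 0 := by
      have : ∀ (l : List Int), (∀ x ∈ l, ∀ res : Int,
          (if PySem.List.pyGet? dist x = some (some k) ∧ res < x then x else res) = res) →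
          ∀ res : Int, l.foldl (fun res x =>
            if PySem.List.pyGet? dist x = some (some k) ∧ res < x then x else res) res = res := by
        intro l
        induction l with
        | nil => intro _ res; rfl
        | cons y yt ihl =>
          intro hl res
          rw [List.foldl_cons, hl y List.mem_cons_self res]
          exact ihl (fun x hx => hl x (List.mem_cons_of_mem _ hx)) res
      refine this done ?_ 0
      intro x hx res
      obtain ⟨m, hm, hmk⟩ := hdone x hx
      rw [if_neg ?_]
      rintro ⟨h1, _⟩
      rw [hm] at h1
      have : m = k := by simpa using h1
      omega
    rw [hdone0]
    have : ∀ (l : List Int), (∀ x ∈ l, PySem.List.pyGet? dist x = some (some k)) →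
        ∀ res : Int, l.foldl (fun res x =>
          if PySem.List.pyGet? dist x = some (some k) ∧ res < x then x else res) res
          = l.foldl (fun r c => if r < c then c else r) res := by
      intro l
      induction l with
      | nil => intro _ res; rfl
      | cons y yt ihl =>
        intro hl res
        rw [List.foldl_cons, List.foldl_cons]
        have heq : (if PySem.List.pyGet? dist y = some (some k) ∧ res < y then y else res)
            = if res < y then y else res := by
          simp [hl y List.mem_cons_self]
        rw [heq]
        exact ihl (fun x hx => hl x (List.mem_cons_of_mem _ hx)) _
    exact this layer hk 0

-- the main simulation, by strong induction on the number of unvisited cells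
theorem loop_sim (lst : List (List Int)) :
    ∀ (N : Nat) (visited : List Int) (dist : List (Option Int)) (done layer : List Int) (k : Int),
    visited.count 0 ≤ N →
    RelAB visited dist →
    (∀ x ∈ layer, PySem.List.pyGet? dist x = some (some k)) →
    (∀ x ∈ done, ∃ m, PySem.List.pyGet? dist x = some (some m) ∧ m < k) →
    layer ≠ [] →
    bfsLoopA lst visited layer
      = bfsExtract (bfsLoopB lst dist done layer).1 (bfsLoopB lst dist done layer).2 := by
  intro N
  induction N using Nat.strong_induction_on with
  | _ N ihN =>
    intro visited dist done layer k hN hRel hk hdone hne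
    rw [bfsLoopA]
    obtain ⟨LQ, LRel, LRes, LChar, LProv⟩ := layer_sim lst layer 0 visited dist k hRel hk
    have unchanged : ∀ (x : Int) (m : Int), PySem.List.pyGet? dist x = some (some m) →
        PySem.List.pyGet? (procB lst layer dist []).1 x = some (some m) := by
      intro x m hx
      obtain ⟨cx, hkx, hcxlt, hcxval⟩ := pyGet?_cell dist x (some m) hx
      rw [hRel.2.1] at hkx
      rw [pyGet?_eq_some_getD _ x cx none (by rw [LRel.2.1]; exact hkx)]
      rw [LChar cx (pvIdx_lt _ _ _ hkx)]
      by_cases hxQ : ∃ y ∈ (procB lst layer dist []).2, PySem.List.pyIdx? 101 y = some cx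
      · exfalso
        obtain ⟨y, hy1, hy2⟩ := hxQ
        obtain ⟨cy, hky, hcylt, hcyval⟩ := pyGet?_cell dist y none (LProv y hy1)
        rw [hRel.2.1] at hky
        rw [hky] at hy2
        have : cy = cx := by simpa using hy2
        subst this
        rw [hcyval] at hcxval
        cases hcxval
      · rw [if_neg hxQ, List.getD_eq_getElem _ _ hcxlt, hcxval]
    have hB : bfsLoopB lst dist done layer
        = bfsLoopB lst (procB lst layer dist []).1 (done ++ layer) (procB lst layer dist []).2 := by
      conv_lhs => rw [← List.append_nil layer]
      rw [bfsLoopB_append, List.nil_append]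
    by_cases hQ : (bfsLayer lst layer 0 visited []).2.2 = []
    · rw [if_pos hQ]
      have hQB : (procB lst layer dist []).2 = [] := by rw [← LQ]; exact hQ
      rw [hB, hQB, bfsLoopB]
      have hD : (procB lst layer dist []).1 = dist := by
        apply List.ext_getElem (by rw [LRel.2.1, hRel.2.1])
        intro j h1 h2
        have hch := LChar j (by rw [LRel.2.1] at h1; omega)
        rw [hQB] at hch
        simp only [List.not_mem_nil, false_and, exists_false, if_false] at hch
        rw [List.getD_eq_getElem _ _ h1, List.getD_eq_getElem _ _ h2] at hch
        exact hch
      rw [hD, LRes]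
      exact (extract_eq dist done layer k hdone hk hne).symm
    · rw [if_neg hQ]
      have hcount := bfsLayer_count lst layer 0 visited []
      have hQlen : (bfsLayer lst layer 0 visited []).2.2.length ≠ 0 := by
        simpa [List.length_eq_zero_iff] using hQ
      have hlt : (bfsLayer lst layer 0 visited []).2.1.count 0 < N := by
        simp only [List.length_nil] at hcount
        omega
      rw [hB, LQ]
      refine ihN ((bfsLayer lst layer 0 visited []).2.1.count 0) hlt
        (bfsLayer lst layer 0 visited []).2.1 (procB lst layer dist []).1
        (done ++ layer) (procB lst layer dist []).2 (k + 1) (le_refl _) LRel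
        ?_ ?_ (by rw [← LQ]; exact hQ)
      · intro x hx
        obtain ⟨cx, hkx, hcxlt, hcxval⟩ := pyGet?_cell dist x none (LProv x hx)
        rw [hRel.2.1] at hkx
        rw [pyGet?_eq_some_getD _ x cx none (by rw [LRel.2.1]; exact hkx)]
        rw [LChar cx (pvIdx_lt _ _ _ hkx), if_pos ⟨x, hx, hkx⟩]
      · intro x hx
        rcases List.mem_append.mp hx with hx1 | hx2
        · obtain ⟨m, hm, hmk⟩ := hdone x hx1
          exact ⟨m, unchanged x m hm, by omega⟩
        · exact ⟨k, unchanged x k (hk x hx2), by omega⟩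

-- ===== VERDICT (by name: the statement is the Claim_ definition above) =====
theorem bfs_spec : Claim_equal_bfs := by
  unfold Claim_equal_bfs
  intro v lst hDom hPre
  obtain ⟨hok, _⟩ := hPre
  have h01 : -101 ≤ v ∧ v < 101 := by
    have := hok
    unfold pvOk2 pvOkV at this
    simp at this
    exact ⟨this.1.1, this.1.2⟩
  obtain ⟨h0, h1⟩ := h01
  unfold Spec_bfs bfs bfs_alt
  obtain ⟨c, hc⟩ : ∃ c : Nat, PySem.List.pyIdx? 101 v = some c := by
    unfold PySem.List.pyIdx?
    split_ifs with p1 p2 p3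
    · exact ⟨_, rfl⟩
    · omega
    · exact ⟨_, rfl⟩
    · omega
  have hclt : c < 101 := pvIdx_lt _ _ _ hc
  have hsetv : PySem.List.pySetD (List.replicate 101 (0 : Int)) v 1
      = (List.replicate 101 (0 : Int)).set c 1 :=
    pySetD_cell _ v c 1 (by simpa using hc)
  have hsetd : PySem.List.pySetD (List.replicate 101 (none : Option Int)) v (some 0)
      = (List.replicate 101 (none : Option Int)).set c (some 0) :=
    pySetD_cell _ v c _ (by simpa using hc)
  rw [hsetv, hsetd]
  have hlenv : ((List.replicate 101 (0 : Int)).set c 1).length = 101 := by simp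
  have hlend : ((List.replicate 101 (none : Option Int)).set c (some 0)).length = 101 := by simp
  have hRel0 : RelAB ((List.replicate 101 (0 : Int)).set c 1)
      ((List.replicate 101 (none : Option Int)).set c (some 0)) := by
    refine ⟨hlenv, hlend, ?_⟩
    intro j hj
    rw [getD_set' _ c 1 1 j (by simpa using hj), getD_set' _ c (some 0) none j (by simpa using hj)]
    by_cases he : c = j
    · simp [he]
    · rw [if_neg he, if_neg he]
      rw [List.getD_eq_getElem _ _ (by simpa using hj), List.getD_eq_getElem _ _ (by simpa using hj)]
      rw [List.getElem_replicate, List.getElem_replicate]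
      simp
  refine loop_sim lst (((List.replicate 101 (0 : Int)).set c 1).count 0) _ _ [] [v] 0
    (le_refl _) hRel0 ?_ (by simp) (by simp)
  intro x hx
  have : x = v := by simpa using hx
  subst this
  rw [pyGet?_eq_some_getD _ x c none (by rw [hlend]; exact hc)]
  rw [getD_set' _ c (some 0) none c (by simp [hclt]), if_pos rfl]
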